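-- pv_equiv track=rewrite | github.com/raidelo/regex_renamer | regex_renamer.py | compare_paths
-- ===== SOURCE A (Python) =====
-- def compare_paths(p1: str, p2: str) -> bool:
--     """
--     Checks if 2 paths are the same, returns `True` or `Flase`.
--     It considers '/' and '\\' as the same.
--
--     :p1: path 1
--     :p2: path 2
--     """
--     psep = ["\\", "/"]
--     if len(p1) != len(p2):
--         return False
--     for x, y in zip(p1, p2):
--         if x in psep and y in psep:
--             continue
--         elif x == y:
--             continue
--         else:
--             return False
--     return True
-- ===== SOURCE B (Python) =====
-- def compare_paths(p1: str, p2: str) -> bool: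
--     # normalize every separator to '/' and compare once
--     SEP = '/'
--     return ''.join(SEP if c == '\\' else c for c in p1) == \
--            ''.join(SEP if c == '\\' else c for c in p2)
-- ===== Notes on version B (the rewrite author's own statement) =====
-- stated objective: idiomatic
-- what changed: Replaces the explicit length check plus character-by-character zip loop with normalize-then-compare: each string has backslashes mapped to '/', and a single string equality does the rest.
import Mathlib
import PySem

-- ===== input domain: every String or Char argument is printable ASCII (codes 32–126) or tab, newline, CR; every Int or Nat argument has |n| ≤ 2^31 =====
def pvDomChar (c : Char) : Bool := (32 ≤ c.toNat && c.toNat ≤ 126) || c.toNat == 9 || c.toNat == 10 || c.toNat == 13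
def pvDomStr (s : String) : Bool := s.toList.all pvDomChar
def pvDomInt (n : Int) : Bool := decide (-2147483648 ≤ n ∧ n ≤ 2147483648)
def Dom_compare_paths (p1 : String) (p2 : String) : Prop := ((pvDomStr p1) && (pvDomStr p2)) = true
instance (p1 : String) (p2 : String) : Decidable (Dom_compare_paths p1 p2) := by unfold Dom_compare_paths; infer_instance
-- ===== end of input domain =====

-- B normalizes both strings (backslash → '/') and compares once, instead of A's length check plus zip loop; objective: idiomatic.

-- ===== PORT A =====
-- the zip loop of A over the two character lists
def cpLoop : List Char → List Char → Bool
  | x :: xs, y :: ys =>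
    if (x = '\\' ∨ x = '/') ∧ (y = '\\' ∨ y = '/') then cpLoop xs ys
    else if x = y then cpLoop xs ys
    else false
  | _, _ => true

def compare_paths (p1 : String) (p2 : String) : Bool :=
  if p1.toList.length ≠ p2.toList.length then false
  else cpLoop p1.toList p2.toList

-- ===== PORT B =====
-- ''.join(SEP if c == '\\' else c for c in p) as a map over the characters
def cpNorm (c : Char) : Char := if c = '\\' then '/' else c

def compare_paths_alt (p1 : String) (p2 : String) : Bool :=
  p1.toList.map cpNorm == p2.toList.map cpNorm

-- ===== PRECONDITION & SPEC =====
def Spec_compare_paths (p1 : String) (p2 : String) (out : Bool) : Prop := out = compare_paths_alt p1 p2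
instance (p1 : String) (p2 : String) (out : Bool) : Decidable (Spec_compare_paths p1 p2 out) := by unfold Spec_compare_paths; infer_instance

-- ===== CLAIM (what is proved, stated in full; the proofs are below) =====
def Claim_equal_compare_paths : Prop := ∀ (p1 : String) (p2 : String), Dom_compare_paths p1 p2 → Spec_compare_paths p1 p2 (compare_paths p1 p2)

-- ===== LEMMAS AND PROOFS =====

theorem cpNorm_eq_iff (x y : Char) :
    cpNorm x = cpNorm y ↔ (((x = '\\' ∨ x = '/') ∧ (y = '\\' ∨ y = '/')) ∨ x = y) := by
  unfold cpNorm
  by_cases hx : x = '\\' <;> by_cases hy : y = '\\' <;> simp [hx, hy] <;> aesop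

theorem cpLoop_eq_norm : ∀ (xs ys : List Char), xs.length = ys.length →
    cpLoop xs ys = (xs.map cpNorm == ys.map cpNorm) := by
  intro xs
  induction xs with
  | nil => intro ys h; cases ys <;> simp_all [cpLoop]
  | cons x xs ih =>
    intro ys h
    cases ys with
    | nil => simp at h
    | cons y ys =>
      simp only [List.length_cons, Nat.add_right_cancel_iff] at h
      simp only [cpLoop, List.map, List.cons_beq_cons]
      by_cases hsep : (x = '\\' ∨ x = '/') ∧ (y = '\\' ∨ y = '/')
      · have : cpNorm x = cpNorm y := (cpNorm_eq_iff x y).mpr (Or.inl hsep)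
        simp [hsep, this, ih ys h]
      · by_cases hxy : x = y
        · have : cpNorm x = cpNorm y := (cpNorm_eq_iff x y).mpr (Or.inr hxy)
          simp [hxy, ih ys h]
        · have : cpNorm x ≠ cpNorm y := by
            intro hc; rcases (cpNorm_eq_iff x y).mp hc with h1 | h1
            · exact hsep h1
            · exact hxy h1
          simp [hsep, hxy, this]

-- ===== VERDICT (by name: the statement is the Claim_ definition above) =====
theorem compare_paths_spec : Claim_equal_compare_paths := by
  intro p1 p2 _
  unfold Spec_compare_paths compare_paths compare_paths_alt
  by_cases hlen : p1.toList.length = p2.toList.length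
  · simp [hlen, cpLoop_eq_norm _ _ hlen]
  · have hne : p1.toList.map cpNorm ≠ p2.toList.map cpNorm := by
      intro hc
      exact hlen (by simpa using congrArg List.length hc)
    simp only [String.length_toList] at hlen
    simp [hlen, hne]
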